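-- pv_equiv track=rewrite | github.com/ishangawande55/ApexaIQ_Internship_Ishan_Gawande | Day-02/count_special_array.py | count_special_subarrays
-- ===== SOURCE A (Python) =====
-- from collections import defaultdict
--
-- def count_special_subarrays(n, arr):
--     prefix_sum = 0
--     prefix_xor = 0
--     count = 0
--     freq = defaultdict(int)
--
--     # Initial condition
--     freq[0] = 1
--
--     for i in range(n):
--         prefix_sum += arr[i]
--         prefix_xor ^= arr[i]
--
--         # Check how many times (prefix_sum - prefix_xor) has appeared before
--         count += freq[prefix_sum - prefix_xor]
--
--         # frequency map
--         freq[prefix_sum - prefix_xor] += 1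
--
--     return count
-- ===== SOURCE B (Python) =====
-- def count_special_subarrays(n, arr):
--     # Collect all prefix (sum - xor) values (0 for the empty prefix), sort
--     # them, and count equal pairs run by run in the sorted order.
--     diffs = [0]
--     s = 0
--     x = 0
--     for a in arr[:max(n, 0)]:
--         s += a
--         x ^= a
--         diffs.append(s - x)
--     diffs.sort()
--     total = 0
--     run = 1
--     prev = diffs[0]
--     for d in diffs[1:]:
--         if d == prev:
--             run += 1
--         else:
--             total += run * (run - 1) // 2
--             run = 1
--             prev = d
--     return total + run * (run - 1) // 2
-- ===== Notes on version B (the rewrite author's own statement) =====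
-- stated objective: alternative
-- what changed: A keeps a running pair count against a hash frequency dict in one pass; B instead materialises all prefix (sum - xor) values, sorts them, and counts equal pairs run by run with run*(run-1)//2 per run of equal values.
import Mathlib
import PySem

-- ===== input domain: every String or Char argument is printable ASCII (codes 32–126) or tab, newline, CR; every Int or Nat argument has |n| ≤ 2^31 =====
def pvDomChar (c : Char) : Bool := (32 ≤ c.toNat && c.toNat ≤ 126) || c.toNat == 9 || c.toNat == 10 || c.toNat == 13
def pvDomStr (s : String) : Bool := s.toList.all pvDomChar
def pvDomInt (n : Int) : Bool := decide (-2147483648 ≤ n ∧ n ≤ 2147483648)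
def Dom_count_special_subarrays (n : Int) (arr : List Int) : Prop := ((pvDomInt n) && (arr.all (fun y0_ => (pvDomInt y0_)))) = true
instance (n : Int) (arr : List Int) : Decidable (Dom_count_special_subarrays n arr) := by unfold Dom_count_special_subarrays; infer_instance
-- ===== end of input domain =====

-- B replaces A's one-pass hash-frequency pair count by sort-then-run-scan over
-- all prefix (sum - xor) values (counting run*(run-1)//2 per run of equal values).


-- ===== PORT A =====
-- state: (prefix_sum, prefix_xor, count, freq); freq[0]=1 seed; defaultdict reads are getD
-- (defaultdict's key insertion on read only affects iteration order, which A never uses).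
def count_special_subarrays (n : Int) (arr : List Int) : Int :=
  let st := (PySem.List.pyRange 0 n 1).foldl
    (fun (st : Int × Int × Int × PySem.Dict Int Int) i =>
      let a := PySem.List.pyGetD arr i 0   -- arr[i]; Pre_ guarantees i in range
      let s := st.1 + a
      let x := PySem.Int.bxor st.2.1 a
      let d := s - x
      (s, x, st.2.2.1 + st.2.2.2.getD d 0, st.2.2.2.modify d 0 (· + 1)))
    (0, 0, 0, (PySem.Dict.empty.insert 0 1))
  st.2.2.1

-- ===== PORT B =====
def count_special_subarrays_alt (n : Int) (arr : List Int) : Int :=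
  let st := (PySem.List.slice arr none (some (max n 0))).foldl   -- arr[:max(n, 0)]
    (fun (st : Int × Int × List Int) a =>
      let s := st.1 + a
      let x := PySem.Int.bxor st.2.1 a
      (s, x, st.2.2 ++ [s - x]))
    (0, 0, ([0] : List Int))
  let diffs := PySem.List.sorted st.2.2 (fun v => v) false      -- diffs.sort()
  match diffs with
  | [] => 0     -- unreachable: diffs always contains the empty-prefix value 0
  | d0 :: rest =>                                               -- prev = diffs[0]; for d in diffs[1:]
    let fin := rest.foldl
      (fun (st : Int × Int × Int) d =>
        if d = st.2.2 then (st.1, st.2.1 + 1, st.2.2)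
        else (st.1 + PySem.Int.floordiv (st.2.1 * (st.2.1 - 1)) 2, 1, d))
      (0, 1, d0)
    fin.1 + PySem.Int.floordiv (fin.2.1 * (fin.2.1 - 1)) 2

-- ===== PRECONDITION & SPEC =====
-- A raises IndexError iff n > len(arr) (range(n) is empty for n ≤ 0); nothing else is excluded.
def Pre_count_special_subarrays (n : Int) (arr : List Int) : Prop := n ≤ (arr.length : Int)
instance (n : Int) (arr : List Int) : Decidable (Pre_count_special_subarrays n arr) := by
  unfold Pre_count_special_subarrays; infer_instance
def pvWitness_count_special_subarrays : Int × List Int := (3, [2, 5, 7])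

def Spec_count_special_subarrays (n : Int) (arr : List Int) (out : Int) : Prop := out = count_special_subarrays_alt n arr
instance (n : Int) (arr : List Int) (out : Int) : Decidable (Spec_count_special_subarrays n arr out) := by unfold Spec_count_special_subarrays; infer_instance

-- ===== CLAIM (what is proved, stated in full; the proofs are below) =====
def Claim_equal_count_special_subarrays : Prop := ∀ (n : Int) (arr : List Int), Dom_count_special_subarrays n arr → Pre_count_special_subarrays n arr → Spec_count_special_subarrays n arr (count_special_subarrays n arr)

-- ===== LEMMAS AND PROOFS =====

-- the sequence of prefix (sum - xor) values produced from running sum s and xor x over l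
def dlist (s x : Int) : List Int → List Int
  | [] => []
  | a :: t =>
    let s' := s + a
    let x' := PySem.Int.bxor x a
    (s' - x') :: dlist s' x' t

-- running pair count: for each new value, how often it occurred before (hist = values seen so far)
def cntPairs (hist : List Int) : List Int → Int
  | [] => 0
  | d :: t => (hist.count d : Int) + cntPairs (hist ++ [d]) t

def c2 (r : Int) : Int := PySem.Int.floordiv (r * (r - 1)) 2

lemma fold_range_eq_take {σ : Type} (f : σ → Int → σ) (init : σ) (n : Int) (arr : List Int)
    (h0 : 0 ≤ n) (h1 : n ≤ (arr.length : Int)) :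
    (PySem.List.pyRange 0 n 1).foldl (fun acc i => f acc (PySem.List.pyGetD arr i 0)) init
      = (arr.take n.toNat).foldl f init := by
  have hlen : ((arr.take n.toNat).length : Int) = n := by
    simp [List.length_take]; omega
  have := PySem.List.foldl_pyRange_pyGetD (a := 0) (xs := arr.take n.toNat) (f := f)
      (d := 0) (init := init) (le_refl 0)
  rw [PySem.List.len_eq, hlen] at this
  simp only [Int.toNat_zero, List.drop_zero] at this
  rw [← this]
  apply PySem.List.foldl_congr_mem
  intro acc i hi
  have hmem := (PySem.List.mem_pyRange_one).mp hi
  congr 1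
  have hi0 : 0 ≤ i := hmem.1
  have hin : i < n := hmem.2
  obtain ⟨m, rfl⟩ := Int.eq_ofNat_of_zero_le hi0
  rw [PySem.List.pyGetD_natCast, PySem.List.pyGetD_natCast]
  have hm : m < n.toNat := by omega
  simp [hm]

lemma fold_range_eq_take' {σ : Type} (g : σ → Int → σ) (f : σ → Int → σ) (init : σ)
    (n : Int) (arr : List Int) (h0 : 0 ≤ n) (h1 : n ≤ (arr.length : Int))
    (hg : ∀ acc i, g acc i = f acc (PySem.List.pyGetD arr i 0)) :
    (PySem.List.pyRange 0 n 1).foldl g init = (arr.take n.toNat).foldl f init := by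
  have h1' := PySem.List.foldl_congr_mem (l := PySem.List.pyRange 0 n 1) (f := g)
    (g := fun acc i => f acc (PySem.List.pyGetD arr i 0)) (init := init)
    (fun acc i _ => hg acc i)
  exact h1'.trans (fold_range_eq_take f init n arr h0 h1)

-- the loop bodies, as applied to the current element
def fA : (Int × Int × Int × PySem.Dict Int Int) → Int → (Int × Int × Int × PySem.Dict Int Int) :=
  fun st a =>
    let s := st.1 + a
    let x := PySem.Int.bxor st.2.1 a
    let d := s - x
    (s, x, st.2.2.1 + st.2.2.2.getD d 0, st.2.2.2.modify d 0 (· + 1))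

def fB : (Int × Int × List Int) → Int → (Int × Int × List Int) :=
  fun st a =>
    let s := st.1 + a
    let x := PySem.Int.bxor st.2.1 a
    (s, x, st.2.2 ++ [s - x])

def fC : (Int × Int × Int) → Int → (Int × Int × Int) :=
  fun st d =>
    if d = st.2.2 then (st.1, st.2.1 + 1, st.2.2)
    else (st.1 + c2 st.2.1, 1, d)

-- A's fold equals c plus cntPairs with the dict abstracted as a history list
lemma aFold_eq_cntPairs (l : List Int) (s x c : Int) (freq : PySem.Dict Int Int) (hist : List Int)
    (hfreq : ∀ d, freq.getD d 0 = (hist.count d : Int)) :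
    (l.foldl fA (s, x, c, freq)).2.2.1 = c + cntPairs hist (dlist s x l) := by
  induction l generalizing s x c freq hist with
  | nil => simp [dlist, cntPairs]
  | cons a t ih =>
    simp only [List.foldl_cons, dlist, cntPairs, fA]
    rw [ih _ _ _ _ (hist ++ [s + a - PySem.Int.bxor x a]) ?inv]
    · rw [hfreq]
      ring
    case inv =>
      intro k
      rw [PySem.Dict.getD_modify]
      by_cases hk : k = s + a - PySem.Int.bxor x a
      · subst hk
        simp [List.count_append, hfreq]
      · have hne : ¬ s + a - PySem.Int.bxor x a = k := fun h => hk h.symm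
        simp [hfreq, List.count_append, hk, hne]

-- B's first fold builds exactly the seed ++ dlist
lemma bFold_diffs (l : List Int) (s x : Int) (ds : List Int) :
    (l.foldl fB (s, x, ds)).2.2 = ds ++ dlist s x l := by
  induction l generalizing s x ds with
  | nil => simp [dlist]
  | cons a t ih => simp [dlist, fB, ih]

lemma c2_succ (c : Int) : c2 (c + 1) = c2 c + c := by
  unfold c2
  rw [PySem.Int.floordiv_eq_ediv_of_pos (by norm_num), PySem.Int.floordiv_eq_ediv_of_pos (by norm_num)]
  have h : (c + 1) * (c + 1 - 1) = c * (c - 1) + c * 2 := by ring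
  rw [h, Int.add_mul_ediv_right _ _ (by norm_num : (2:Int) ≠ 0)]

lemma c2_one : c2 1 = 0 := by decide

-- cntPairs reads the history only through counts
lemma cntPairs_congr_hist (ds : List Int) (h1 h2 : List Int)
    (hc : ∀ d, h1.count d = h2.count d) : cntPairs h1 ds = cntPairs h2 ds := by
  induction ds generalizing h1 h2 with
  | nil => rfl
  | cons d t ih =>
    simp only [cntPairs, hc d]
    rw [ih (h1 ++ [d]) (h2 ++ [d]) (fun k => by simp [List.count_append, hc k])]

-- cntPairs is invariant under permutation of the scanned list
lemma cntPairs_perm (ds1 ds2 : List Int) (hp : ds1.Perm ds2) :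
    ∀ hist, cntPairs hist ds1 = cntPairs hist ds2 := by
  induction hp with
  | nil => intro hist; rfl
  | cons a _ ih => intro hist; simp only [cntPairs]; rw [ih (hist ++ [a])]
  | swap a b t =>
    intro hist
    simp only [cntPairs]
    rw [cntPairs_congr_hist t (hist ++ [b] ++ [a]) (hist ++ [a] ++ [b])
      (fun k => by simp only [List.count_append]; omega)]
    by_cases hab : a = b
    · subst hab; ring
    · have h1 : (hist ++ [a]).count b = hist.count b := by
        simp [List.count_append, hab]
      have h2 : (hist ++ [b]).count a = hist.count a := by
        simp [List.count_append, Ne.symm hab]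
      rw [h1, h2]; ring
  | trans _ _ ih1 ih2 => intro hist; rw [ih1, ih2]

-- a history prefix of values strictly below everything scanned is never counted
lemma cntPairs_drop_replicate (t : List Int) (k : Nat) (p : Int) (hist : List Int)
    (hne : ∀ b ∈ t, b ≠ p) :
    cntPairs (List.replicate k p ++ hist) t = cntPairs hist t := by
  induction t generalizing hist with
  | nil => rfl
  | cons b t ih =>
    simp only [cntPairs, List.count_append, List.count_replicate, beq_iff_eq]
    rw [if_neg (fun h => hne b List.mem_cons_self h.symm)]
    rw [List.append_assoc]
    rw [ih (hist ++ [b]) (fun c hc => hne c (List.mem_cons_of_mem _ hc))]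
    simp

-- the run scan over a sorted tail computes the running pair count
lemma runScan_eq_cntPairs (t : List Int) (total prev : Int) (k : Nat)
    (hs : t.Pairwise (· ≤ ·)) (hge : ∀ a ∈ t, prev ≤ a) :
    (t.foldl fC (total, (k : Int), prev)).1 + c2 (t.foldl fC (total, (k : Int), prev)).2.1
      = total + c2 (k : Int) + cntPairs (List.replicate k prev) t := by
  induction t generalizing total prev k with
  | nil => simp [cntPairs]
  | cons a t ih =>
    have hs' := (List.pairwise_cons.mp hs).2
    have hha := (List.pairwise_cons.mp hs).1
    by_cases hap : a = prev
    · subst hap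
      simp only [List.foldl_cons, fC, if_true]
      have : ((k : Int) + 1) = ((k + 1 : Nat) : Int) := by push_cast; ring
      rw [this, ih total a (k + 1) hs' (fun b hb => hge b (List.mem_cons_of_mem _ hb))]
      simp only [cntPairs, List.count_replicate, beq_iff_eq, if_pos]
      rw [← this, c2_succ]
      have hrep : List.replicate k a ++ [a] = List.replicate (k + 1) a :=
        (List.replicate_succ').symm
      rw [hrep]
      ring
    · have hlt : prev < a := lt_of_le_of_ne (hge a List.mem_cons_self) (fun h => hap h.symm)
      simp only [List.foldl_cons, fC, if_neg hap]
      have h1 : ((1 : Int)) = ((1 : Nat) : Int) := by norm_num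
      rw [h1, ih (total + c2 (k : Int)) a 1 hs' hha]
      simp only [cntPairs, List.count_replicate, beq_iff_eq]
      rw [if_neg (fun h => hap h.symm)]
      have hne : ∀ b ∈ t, b ≠ prev := fun b hb h =>
        absurd (lt_of_lt_of_le hlt (hha b hb)) (by rw [h]; exact lt_irrefl prev)
      rw [cntPairs_drop_replicate t k prev [a] hne]
      simp [c2_one]

lemma negative_case (n : Int) (arr : List Int) (h : n < 0) :
    count_special_subarrays n arr = count_special_subarrays_alt n arr := by
  unfold count_special_subarrays count_special_subarrays_alt
  rw [PySem.List.pyRange_one_eq_nil (by omega)]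
  have hm : max n 0 = ((0 : Nat) : Int) := by simp; omega
  rw [hm, PySem.List.slice_to_natCast]
  simp only [List.take_zero, List.foldl_nil]
  decide

-- ===== VERDICT (by name: the statement is the Claim_ definition above) =====
theorem count_special_subarrays_spec : Claim_equal_count_special_subarrays := by
  intro n arr _ hpre
  unfold Spec_count_special_subarrays
  by_cases hn : 0 ≤ n
  · -- A's side: fold over range = fold over take, then the running pair count
    have eA : count_special_subarrays n arr
        = ((arr.take n.toNat).foldl fA (0, 0, 0, PySem.Dict.empty.insert 0 1)).2.2.1 :=
      congrArg (fun st : Int × Int × Int × PySem.Dict Int Int => st.2.2.1)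
        (fold_range_eq_take' _ fA _ n arr hn hpre (fun acc i => rfl))
    have hinv0 : ∀ d, (PySem.Dict.empty.insert 0 1 : PySem.Dict Int Int).getD d 0
        = (([0] : List Int).count d : Int) := by
      intro d
      by_cases hd : d = 0
      · subst hd; simp [PySem.Dict.getD_insert_self]
      · rw [PySem.Dict.getD_insert_of_ne]
        · simp [PySem.Dict.getD, PySem.Dict.get?, PySem.Dict.empty,
            List.count_singleton]
          omega
        · exact hd
    have hA : count_special_subarrays n arr
        = cntPairs [0] (dlist 0 0 (arr.take n.toNat)) := by
      rw [eA, aFold_eq_cntPairs _ 0 0 0 _ [0] hinv0, zero_add]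
    -- B's side
    have hmax : max n 0 = n := by omega
    have eslice : PySem.List.slice arr none (some (max n 0)) = arr.take n.toNat := by
      rw [hmax, PySem.List.slice_to _ hn]
    have ediffs : ((arr.take n.toNat).foldl fB (0, 0, ([0] : List Int))).2.2
        = [0] ++ dlist 0 0 (arr.take n.toNat) := bFold_diffs _ 0 0 [0]
    set ds : List Int := [0] ++ dlist 0 0 (arr.take n.toNat) with hds
    have hperm : (PySem.List.sorted ds (fun v => v) false).Perm ds :=
      PySem.List.sorted_perm ds (fun v => v) false
    have hsorted : (PySem.List.sorted ds (fun v => v) false).Pairwise (· ≤ ·) :=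
      PySem.List.sorted_pairwise ds (fun v => v)
    have hnil : PySem.List.sorted ds (fun v => v) false ≠ [] := by
      intro h
      have := (PySem.List.sorted_eq_nil_iff (xs := ds) (key := fun v => v) (rev := false)).mp h
      simp [hds] at this
    have eB : count_special_subarrays_alt n arr
        = match PySem.List.sorted ds (fun v => v) false with
          | [] => 0
          | d0 :: rest =>
            (rest.foldl fC (0, 1, d0)).1 + c2 (rest.foldl fC (0, 1, d0)).2.1 := by
      unfold count_special_subarrays_alt
      rw [eslice]
      show (match PySem.List.sorted ((List.take n.toNat arr).foldl fB (0, 0, ([0] : List Int))).2.2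
              (fun v => v) false with
            | [] => 0
            | d0 :: rest =>
              (rest.foldl fC (0, 1, d0)).1 + c2 (rest.foldl fC (0, 1, d0)).2.1) = _
      rw [ediffs]
    cases hcase : PySem.List.sorted ds (fun v => v) false with
    | nil => exact absurd hcase hnil
    | cons d0 rest =>
      have eB' : count_special_subarrays_alt n arr
          = (rest.foldl fC (0, 1, d0)).1 + c2 (rest.foldl fC (0, 1, d0)).2.1 := by
        rw [eB, hcase]
      have hps := hcase ▸ hsorted
      have hrest := (List.pairwise_cons.mp hps).2
      have hge := (List.pairwise_cons.mp hps).1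
      rw [hA, eB']
      rw [show ((1 : Int)) = ((1 : Nat) : Int) from by norm_num]
      rw [runScan_eq_cntPairs rest 0 d0 1 hrest hge]
      have h1 : cntPairs [] (d0 :: rest) = cntPairs (List.replicate 1 d0) rest := by
        simp [cntPairs]
      have h2 : cntPairs [] (d0 :: rest) = cntPairs [] ds :=
        cntPairs_perm _ _ (hcase ▸ hperm) []
      have h3 : cntPairs [] ds = cntPairs [0] (dlist 0 0 (arr.take n.toNat)) := by
        simp [hds, cntPairs]
      rw [← h1, h2, h3]
      simp [c2_one]
  · exact negative_case n arr (by omega)
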